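-- pv_equiv track=rewrite | github.com/NLPWM-WHU/CATUS | POI_data_cross_city_process_FlashBack.py | generate_segment_hier
-- ===== SOURCE A (Python) =====
-- def generate_segment_hier(current_sentence_time, last_sentence_segment, interval_time):
--     current_sentence_segment = []
--     begin1 = 1
--     current_time = current_sentence_time[0]
--     current_segment = last_sentence_segment[0]
--     begin_index = 0
--     indicate_index = 0
--     for idx, time in enumerate(current_sentence_time):
--         if last_sentence_segment[idx] == current_segment:
--             continue
--             # current_sentence_segment.append(begin1)
--         else:
--             ## find segment interval
--             if current_sentence_time[idx - 1] - current_time < interval_time: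
--                 current_sentence_segment.extend([begin1]*(idx- indicate_index))
--                 current_segment = last_sentence_segment[idx]
--                 indicate_index = idx
--             else:
--                 begin1 += 1
--                 current_sentence_segment.extend([begin1] * (idx - indicate_index))
--                 current_segment = last_sentence_segment[idx]
--                 current_time = time
--                 indicate_index = idx
--     if current_sentence_time[len(current_sentence_time) - 1] - current_time < interval_time:
--         current_sentence_segment.extend([begin1] * (len(current_sentence_time) - indicate_index))
--     else:
--         begin1 += 1
--         current_sentence_segment.extend([begin1] * (len(current_sentence_time) - indicate_index))
--     return current_sentence_segment
-- ===== SOURCE B (Python) =====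
-- def generate_segment_hier(current_sentence_time, last_sentence_segment, interval_time):
--     n = len(current_sentence_time)
--     anchor = current_sentence_time[0]
--     # stage 1: end positions of the maximal runs of equal segment values
--     ends = [i for i in range(1, n)
--             if last_sentence_segment[i] != last_sentence_segment[i - 1]]
--     ends.append(n)
--     # stage 2: partition [0, n) into groups: a run whose last time is at least
--     # interval_time past the group's anchor closes the group at that run's start
--     group_ends = []
--     prev = 0
--     for e in ends:
--         if current_sentence_time[e - 1] - anchor >= interval_time:
--             group_ends.append(prev)
--             if e < n:
--                 anchor = current_sentence_time[e]
--         prev = e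
--     group_ends.append(n)
--     # stage 3: labels are simply the consecutive group numbers 1, 2, 3, ...
--     out = []
--     lo = 0
--     for g, hi in enumerate(group_ends, 1):
--         out += [g] * (hi - lo)
--         lo = hi
--     return out
-- ===== Notes on version B (the rewrite author's own statement) =====
-- stated objective: simpler
-- what changed: B drops A's inline label-emitting state machine (begin1/current_segment/indicate_index threaded through one enumerate loop with extend calls and a trailing duplicate block) and instead computes, in three small staged passes, the run end positions, then a greedy partition of [0,n) into group boundary positions, and finally expands the partition using the observation that the labels are exactly the consecutive group numbers 1,2,3,...; Pre_ only excludes inputs where A raises IndexError (empty time list, or segment list shorter than time list), where B raises too.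
import Mathlib
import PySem

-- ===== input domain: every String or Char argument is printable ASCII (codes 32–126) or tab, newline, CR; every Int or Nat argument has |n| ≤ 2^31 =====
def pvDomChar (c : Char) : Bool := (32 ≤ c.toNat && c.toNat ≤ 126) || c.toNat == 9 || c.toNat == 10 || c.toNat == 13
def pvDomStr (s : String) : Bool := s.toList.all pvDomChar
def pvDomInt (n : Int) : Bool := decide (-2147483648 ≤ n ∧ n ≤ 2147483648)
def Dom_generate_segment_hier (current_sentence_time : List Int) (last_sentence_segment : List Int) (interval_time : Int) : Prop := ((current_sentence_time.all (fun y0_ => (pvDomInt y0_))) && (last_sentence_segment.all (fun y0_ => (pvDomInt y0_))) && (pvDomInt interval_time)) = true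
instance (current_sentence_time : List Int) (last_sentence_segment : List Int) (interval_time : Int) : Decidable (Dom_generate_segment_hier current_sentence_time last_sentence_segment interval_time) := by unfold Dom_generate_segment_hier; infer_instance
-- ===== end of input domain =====

-- B replaces A's inline label-emitting state machine by three staged passes — run ends, a
-- greedy partition of [0,n) into group boundary positions, then expansion with the labels
-- being simply the consecutive group numbers 1,2,3,… — chosen as a simpler decomposition.
-- Neither program mutates its arguments.

-- ===== PORT A =====
-- loop body of A: state = (current_sentence_segment, begin1, current_time, current_segment, indicate_index)
def pvStepA (cst lss : List Int) (it : Int)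
    (s : List Int × Int × Int × Int × Int) (p : Int × Int) : List Int × Int × Int × Int × Int :=
  match s, p with
  | (out, b1, ct, cs, ii), (idx, time) =>
    if PySem.List.pyGetD lss idx 0 == cs then (out, b1, ct, cs, ii)
    else if PySem.List.pyGetD cst (idx - 1) 0 - ct < it then
      (out ++ PySem.List.pyRepeat [b1] (idx - ii), b1, ct, PySem.List.pyGetD lss idx 0, idx)
    else
      (out ++ PySem.List.pyRepeat [b1 + 1] (idx - ii), b1 + 1, time, PySem.List.pyGetD lss idx 0, idx)

def generate_segment_hier (current_sentence_time : List Int) (last_sentence_segment : List Int) (interval_time : Int) : List Int :=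
  let n : Int := current_sentence_time.length
  match (PySem.List.enumerate current_sentence_time 0).foldl
      (pvStepA current_sentence_time last_sentence_segment interval_time)
      ([], 1, PySem.List.pyGetD current_sentence_time 0 0, PySem.List.pyGetD last_sentence_segment 0 0, 0) with
  | (out, b1, ct, _, ii) =>
    if PySem.List.pyGetD current_sentence_time (n - 1) 0 - ct < interval_time then
      out ++ PySem.List.pyRepeat [b1] (n - ii)
    else
      out ++ PySem.List.pyRepeat [b1 + 1] (n - ii)

-- ===== PORT B =====
-- stage-2 body of B: state = (group_ends, anchor, prev)
def pvGroupStep (cst : List Int) (it n : Int)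
    (s : List Int × Int × Int) (e : Int) : List Int × Int × Int :=
  match s with
  | (ge, anchor, prev) =>
    if PySem.List.pyGetD cst (e - 1) 0 - anchor ≥ it then
      (ge ++ [prev], if e < n then PySem.List.pyGetD cst e 0 else anchor, e)
    else (ge, anchor, e)

-- stage-3 body of B: state = (out, lo); input pair = (g, hi) from enumerate(group_ends, 1)
def pvExpandStep (s : List Int × Int) (p : Int × Int) : List Int × Int :=
  match s, p with
  | (out, lo), (g, hi) => (out ++ PySem.List.pyRepeat [g] (hi - lo), hi)

def generate_segment_hier_alt (current_sentence_time : List Int) (last_sentence_segment : List Int) (interval_time : Int) : List Int :=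
  let n : Int := current_sentence_time.length
  let anchor0 := PySem.List.pyGetD current_sentence_time 0 0
  let ends := ((PySem.List.pyRange 1 n 1).filter
      (fun i => !(PySem.List.pyGetD last_sentence_segment i 0 == PySem.List.pyGetD last_sentence_segment (i - 1) 0))) ++ [n]
  let group_ends := (ends.foldl (pvGroupStep current_sentence_time interval_time n) ([], anchor0, 0)).1 ++ [n]
  ((PySem.List.enumerate group_ends 1).foldl pvExpandStep ([], 0)).1

-- ===== PRECONDITION & SPEC =====
-- Pre_ excludes exactly the inputs where A raises IndexError: an empty time list
-- (current_sentence_time[0]) or a segment list shorter than the time list (last_sentence_segment[idx]).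
def Pre_generate_segment_hier (current_sentence_time : List Int) (last_sentence_segment : List Int) (interval_time : Int) : Prop :=
  current_sentence_time ≠ [] ∧ current_sentence_time.length ≤ last_sentence_segment.length
instance (current_sentence_time : List Int) (last_sentence_segment : List Int) (interval_time : Int) : Decidable (Pre_generate_segment_hier current_sentence_time last_sentence_segment interval_time) := by unfold Pre_generate_segment_hier; infer_instance

def pvWitness_generate_segment_hier : List Int × List Int × Int := ([0, 3, 4, 10], [7, 7, 8, 8], 5)

def Spec_generate_segment_hier (current_sentence_time : List Int) (last_sentence_segment : List Int) (interval_time : Int) (out : List Int) : Prop := out = generate_segment_hier_alt current_sentence_time last_sentence_segment interval_time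
instance (current_sentence_time : List Int) (last_sentence_segment : List Int) (interval_time : Int) (out : List Int) : Decidable (Spec_generate_segment_hier current_sentence_time last_sentence_segment interval_time out) := by unfold Spec_generate_segment_hier; infer_instance

-- ===== CLAIM (what is proved, stated in full; the proofs are below) =====
def Claim_equal_generate_segment_hier : Prop := ∀ (current_sentence_time : List Int) (last_sentence_segment : List Int) (interval_time : Int), Dom_generate_segment_hier current_sentence_time last_sentence_segment interval_time → Pre_generate_segment_hier current_sentence_time last_sentence_segment interval_time → Spec_generate_segment_hier current_sentence_time last_sentence_segment interval_time (generate_segment_hier current_sentence_time last_sentence_segment interval_time)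

-- ===== LEMMAS AND PROOFS =====

-- A's trailing block as a function of the reduced state (out, label, ct, prev)
def pvPost (cst : List Int) (it : Int) (s : List Int × Int × Int × Int) : List Int :=
  match s with
  | (out, label, ct, prev) =>
    if PySem.List.pyGetD cst ((cst.length : Int) - 1) 0 - ct ≥ it then
      out ++ PySem.List.pyRepeat [label + 1] ((cst.length : Int) - prev)
    else
      out ++ PySem.List.pyRepeat [label] ((cst.length : Int) - prev)

-- an intermediate emitting loop over the boundaries: state = (out, label, ct, prev)
def pvStepB (cst : List Int) (it : Int)
    (s : List Int × Int × Int × Int) (b : Int) : List Int × Int × Int × Int :=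
  match s with
  | (out, label, ct, prev) =>
    if PySem.List.pyGetD cst (b - 1) 0 - ct ≥ it then
      (out ++ PySem.List.pyRepeat [label + 1] (b - prev), label + 1, PySem.List.pyGetD cst b 0, b)
    else
      (out ++ PySem.List.pyRepeat [label] (b - prev), label, ct, b)

-- boundary predicate
def pvP (lss : List Int) (i : Int) : Bool :=
  !(PySem.List.pyGetD lss i 0 == PySem.List.pyGetD lss (i - 1) 0)

-- the intermediate form both ports are reduced to
def pvEmit (cst lss : List Int) (it : Int) : List Int :=
  pvPost cst it
    (((PySem.List.pyRange 1 (cst.length : Int) 1).filter (pvP lss)).foldl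
      (pvStepB cst it) ([], 1, PySem.List.pyGetD cst 0 0, 0))

lemma pvLoop_eq (cst lss : List Int) (it : Int) :
    ∀ (k i : Nat), i + k = cst.length → 1 ≤ i →
    ∀ (out : List Int) (b1 ct ii : Int),
    pvPost cst it
      ((fun s => (s.1, s.2.1, s.2.2.1, s.2.2.2.2))
        ((PySem.List.enumerate (cst.drop i) (i : Int)).foldl (pvStepA cst lss it)
          (out, b1, ct, lss.getD (i - 1) 0, ii)))
    = pvPost cst it
      (((PySem.List.pyRange (i : Int) (cst.length : Int) 1).filter (pvP lss)).foldl
        (pvStepB cst it) (out, b1, ct, ii)) := by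
  intro k
  induction k with
  | zero =>
    intro i hik h1 out b1 ct ii
    have hi : i = cst.length := by omega
    subst hi
    rw [List.drop_length, PySem.List.enumerate_nil,
        PySem.List.pyRange_one_eq_nil (le_refl _)]
    rfl
  | succ k ih =>
    intro i hik h1 out b1 ct ii
    have hi : i < cst.length := by omega
    have hd : cst.drop i = cst[i] :: cst.drop (i + 1) := List.drop_eq_getElem_cons hi
    rw [hd, PySem.List.enumerate_cons, List.foldl_cons,
        PySem.List.pyRange_one_cons (by exact_mod_cast hi), List.filter_cons]
    have hcast : (i : Int) - 1 = ((i - 1 : Nat) : Int) := by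
      push_cast [Nat.cast_sub h1]; ring
    have hgl : PySem.List.pyGetD lss (i : Int) 0 = lss.getD i 0 := by
      simp [PySem.List.pyGetD_natCast]
    have hgl1 : PySem.List.pyGetD lss ((i : Int) - 1) 0 = lss.getD (i - 1) 0 := by
      rw [hcast]; simp [PySem.List.pyGetD_natCast]
    have hsucc : (i : Int) + 1 = ((i + 1 : Nat) : Int) := by push_cast; ring
    by_cases hseg : lss.getD i 0 = lss.getD (i - 1) 0
    · -- no boundary: A's step is a no-op, the filter drops i
      have hP : pvP lss (i : Int) = false := by
        simp only [pvP]
        rw [hgl, hgl1, hseg]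
        simp only [beq_self_eq_true, Bool.not_true]
      rw [hP]
      simp only [Bool.false_eq_true, if_false]
      have hstep : pvStepA cst lss it (out, b1, ct, lss.getD (i - 1) 0, ii) ((i : Int), cst[i])
          = (out, b1, ct, lss.getD (i - 1) 0, ii) := by
        simp only [pvStepA]
        rw [hgl, hseg, if_pos (beq_self_eq_true _)]
      rw [hstep]
      have hseg' : lss.getD (i - 1) 0 = lss.getD ((i + 1) - 1) 0 := by
        simp only [Nat.add_sub_cancel]
        exact hseg.symm
      rw [hseg', hsucc]
      exact ih (i + 1) (by omega) (by omega) out b1 ct ii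
    · -- boundary: both take a step
      have hP : pvP lss (i : Int) = true := by
        simp only [pvP]
        rw [hgl, hgl1]
        simp only [Bool.not_eq_true', beq_eq_false_iff_ne, ne_eq]
        exact hseg
      rw [hP]
      simp only [if_true]
      rw [List.foldl_cons]
      by_cases hc : PySem.List.pyGetD cst ((i : Int) - 1) 0 - ct < it
      · have hstepA : pvStepA cst lss it (out, b1, ct, lss.getD (i - 1) 0, ii) ((i : Int), cst[i])
            = (out ++ PySem.List.pyRepeat [b1] ((i : Int) - ii), b1, ct, lss.getD i 0, (i : Int)) := by
          simp only [pvStepA]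
          rw [hgl, if_neg (by simp only [beq_iff_eq]; exact hseg), if_pos hc]
        have hstepB : pvStepB cst it (out, b1, ct, ii) (i : Int)
            = (out ++ PySem.List.pyRepeat [b1] ((i : Int) - ii), b1, ct, (i : Int)) := by
          simp only [pvStepB]
          rw [if_neg (by omega)]
        rw [hstepA, hstepB]
        have hseg' : lss.getD i 0 = lss.getD ((i + 1) - 1) 0 := by simp
        rw [hseg', hsucc]
        exact ih (i + 1) (by omega) (by omega) _ b1 ct (i : Int)
      · have hgc : PySem.List.pyGetD cst (i : Int) 0 = cst[i] := by
          simp [PySem.List.pyGetD_natCast, List.getD_eq_getElem?_getD, List.getElem?_eq_getElem hi]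
        have hstepA : pvStepA cst lss it (out, b1, ct, lss.getD (i - 1) 0, ii) ((i : Int), cst[i])
            = (out ++ PySem.List.pyRepeat [b1 + 1] ((i : Int) - ii), b1 + 1, cst[i], lss.getD i 0, (i : Int)) := by
          simp only [pvStepA]
          rw [hgl, if_neg (by simp only [beq_iff_eq]; exact hseg), if_neg hc]
        have hstepB : pvStepB cst it (out, b1, ct, ii) (i : Int)
            = (out ++ PySem.List.pyRepeat [b1 + 1] ((i : Int) - ii), b1 + 1, cst[i], (i : Int)) := by
          simp only [pvStepB]
          rw [if_pos (by omega), hgc]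
        rw [hstepA, hstepB]
        have hseg' : lss.getD i 0 = lss.getD ((i + 1) - 1) 0 := by simp
        rw [hseg', hsucc]
        exact ih (i + 1) (by omega) (by omega) _ (b1 + 1) cst[i] (i : Int)

-- A equals the intermediate form on Pre_
lemma pvA_eq_emit (cst lss : List Int) (it : Int)
    (hne : cst ≠ []) :
    generate_segment_hier cst lss it = pvEmit cst lss it := by
  have hlen1 : 1 ≤ cst.length := List.length_pos_iff.mpr hne
  unfold generate_segment_hier pvEmit
  have hpostA : ∀ (s : List Int × Int × Int × Int × Int),
      (match s with
       | (out, b1, ct, _, ii) =>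
         if PySem.List.pyGetD cst ((cst.length : Int) - 1) 0 - ct < it then
           out ++ PySem.List.pyRepeat [b1] ((cst.length : Int) - ii)
         else
           out ++ PySem.List.pyRepeat [b1 + 1] ((cst.length : Int) - ii))
      = pvPost cst it (s.1, s.2.1, s.2.2.1, s.2.2.2.2) := by
    rintro ⟨out, b1, ct, cs, ii⟩
    simp only [pvPost]
    split_ifs with h1 h2 <;> first | rfl | omega
  rw [hpostA]
  show pvPost cst it _ = _
  have hd0 : cst = cst[0] :: cst.drop 1 := by
    have h := List.drop_eq_getElem_cons (l := cst) (i := 0) hlen1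
    simpa using h
  have henum : PySem.List.enumerate cst 0
      = ((0 : Int), cst[0]) :: PySem.List.enumerate (cst.drop 1) (1 : Int) := by
    conv_lhs => rw [hd0]
    rw [PySem.List.enumerate_cons]
    norm_num
  rw [henum, List.foldl_cons]
  have hstep0 : pvStepA cst lss it
      ([], 1, PySem.List.pyGetD cst 0 0, PySem.List.pyGetD lss 0 0, 0) (0, cst[0])
      = ([], 1, PySem.List.pyGetD cst 0 0, PySem.List.pyGetD lss 0 0, 0) := by
    simp [pvStepA]
  rw [hstep0]
  have hzero : PySem.List.pyGetD lss 0 0 = lss.getD (1 - 1) 0 := by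
    simp [PySem.List.pyGetD_zero]
  rw [hzero]
  have hmain := pvLoop_eq cst lss it (cst.length - 1) 1 (by omega) (by omega)
      [] 1 (PySem.List.pyGetD cst 0 0) 0
  have h1cast : ((1 : Nat) : Int) = (1 : Int) := by norm_num
  rw [h1cast] at hmain
  rw [hmain]

-- recursive form of B's stage 3
def pvExpand (es : List Int) (out : List Int) (g lo : Int) : List Int :=
  match es with
  | [] => out
  | e :: rest => pvExpand rest (out ++ PySem.List.pyRepeat [g] (e - lo)) (g + 1) e

lemma pvExpand_foldl : ∀ (es out : List Int) (g lo : Int),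
    ((PySem.List.enumerate es g).foldl pvExpandStep (out, lo)).1 = pvExpand es out g lo := by
  intro es
  induction es with
  | nil => intro out g lo; simp [PySem.List.enumerate_nil, pvExpand]
  | cons e rest ih =>
    intro out g lo
    rw [PySem.List.enumerate_cons, List.foldl_cons]
    simpa [pvExpandStep, pvExpand] using ih (out ++ PySem.List.pyRepeat [g] (e - lo)) (g + 1) e

lemma pvRepeat_split (g a b c : Int) (h1 : a ≤ b) (h2 : b ≤ c) :
    PySem.List.pyRepeat [g] (b - a) ++ PySem.List.pyRepeat [g] (c - b)
      = PySem.List.pyRepeat [g] (c - a) := by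
  rw [PySem.List.pyRepeat_singleton, PySem.List.pyRepeat_singleton, PySem.List.pyRepeat_singleton,
      ← List.replicate_add]
  congr 1
  omega

lemma pvExpand_shift (e1 : Int) (tail out : List Int) (g prev b : Int)
    (h1 : prev ≤ b) (h2 : b ≤ e1) :
    pvExpand (e1 :: tail) out g prev
      = pvExpand (e1 :: tail) (out ++ PySem.List.pyRepeat [g] (b - prev)) g b := by
  simp only [pvExpand]
  rw [List.append_assoc, pvRepeat_split g prev b e1 h1 h2]

lemma pvGroup_append (cst : List Int) (it n : Int) :
    ∀ (es ge : List Int) (a p : Int),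
    es.foldl (pvGroupStep cst it n) (ge, a, p)
      = (ge ++ (es.foldl (pvGroupStep cst it n) ([], a, p)).1,
         (es.foldl (pvGroupStep cst it n) ([], a, p)).2) := by
  intro es
  induction es with
  | nil => intro ge a p; simp
  | cons e rest ih =>
    intro ge a p
    rw [List.foldl_cons, List.foldl_cons]
    simp only [pvGroupStep]
    by_cases hc : PySem.List.pyGetD cst (e - 1) 0 - a ≥ it
    · rw [if_pos hc, if_pos hc]
      rw [ih (ge ++ [p]), ih ([] ++ [p])]
      simp [List.append_assoc]
    · rw [if_neg hc, if_neg hc]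
      exact ih ge a e

lemma pvGroup_ge (cst : List Int) (it n : Int) :
    ∀ (es : List Int) (a p : Int), es.Pairwise (· ≤ ·) → (∀ e ∈ es, p ≤ e) →
    ∀ x ∈ (es.foldl (pvGroupStep cst it n) ([], a, p)).1, p ≤ x := by
  intro es
  induction es with
  | nil => intro a p _ _ x hx; simp at hx
  | cons e rest ih =>
    intro a p hsort hes x hx
    have hpe : p ≤ e := hes e (by simp)
    have hrest : ∀ y ∈ rest, e ≤ y := fun y hy => (List.pairwise_cons.mp hsort).1 y hy
    rw [List.foldl_cons] at hx
    simp only [pvGroupStep] at hx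
    by_cases hc : PySem.List.pyGetD cst (e - 1) 0 - a ≥ it
    · rw [if_pos hc, pvGroup_append] at hx
      simp only [List.mem_append] at hx
      rcases hx with hx | hx
      · simp only [List.mem_singleton] at hx
        rcases hx with h | h
        · simp at h
        · omega
      · exact le_trans hpe (ih _ e (List.pairwise_cons.mp hsort).2 hrest x hx)
    · rw [if_neg hc] at hx
      exact le_trans hpe (ih a e (List.pairwise_cons.mp hsort).2 hrest x hx)

-- the emitting loop over the boundaries equals B's partition-then-expand pipeline
lemma pvMain (cst : List Int) (it : Int) :
    ∀ (bs out : List Int) (label ct prev : Int),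
    bs.Pairwise (· < ·) →
    (∀ b ∈ bs, prev < b ∧ b < (cst.length : Int)) →
    pvPost cst it (bs.foldl (pvStepB cst it) (out, label, ct, prev))
      = pvExpand
          (((bs ++ [(cst.length : Int)]).foldl
              (pvGroupStep cst it (cst.length : Int)) ([], ct, prev)).1 ++ [(cst.length : Int)])
          out label prev := by
  intro bs
  induction bs with
  | nil =>
    intro out label ct prev _ _
    simp only [List.foldl_nil, List.nil_append, List.foldl_cons, pvGroupStep, pvPost]
    by_cases hc : PySem.List.pyGetD cst ((cst.length : Int) - 1) 0 - ct ≥ it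
    · rw [if_pos hc, if_pos hc]
      simp [pvExpand, PySem.List.pyRepeat_singleton]
    · rw [if_neg hc, if_neg hc]
      simp [pvExpand]
  | cons b rest ih =>
    intro out label ct prev hsort hb
    have hb1 : prev < b := (hb b (by simp)).1
    have hb2 : b < (cst.length : Int) := (hb b (by simp)).2
    have hrest : ∀ y ∈ rest, b < y ∧ y < (cst.length : Int) :=
      fun y hy => ⟨(List.pairwise_cons.mp hsort).1 y hy, (hb y (by simp [hy])).2⟩
    have hsort' : rest.Pairwise (· < ·) := (List.pairwise_cons.mp hsort).2
    -- sortedness of the group-list argument for pvGroup_ge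
    have hsortn : (rest ++ [(cst.length : Int)]).Pairwise (· ≤ ·) := by
      refine List.pairwise_append.mpr ⟨?_, by simp, ?_⟩
      · exact hsort'.imp le_of_lt
      · intro x hx y hy
        simp only [List.mem_singleton] at hy
        subst hy
        exact le_of_lt (hrest x hx).2
    have hgesn : ∀ e ∈ rest ++ [(cst.length : Int)], b ≤ e := by
      intro e he
      rcases List.mem_append.mp he with he | he
      · exact le_of_lt (hrest e he).1
      · simp only [List.mem_singleton] at he; omega
    rw [List.cons_append, List.foldl_cons, List.foldl_cons]
    simp only [pvStepB, pvGroupStep]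
    by_cases hc : PySem.List.pyGetD cst (b - 1) 0 - ct ≥ it
    · rw [if_pos hc, if_pos hc, if_pos hb2]
      rw [ih _ (label + 1) _ b hsort' hrest]
      conv_rhs => rw [pvGroup_append]
      set X := ((rest ++ [(cst.length : Int)]).foldl
          (pvGroupStep cst it (cst.length : Int)) ([], PySem.List.pyGetD cst b 0, b)) with hX
      simp only [List.nil_append, List.append_assoc, List.singleton_append]
      have hxge : ∀ x ∈ X.1, b ≤ x :=
        pvGroup_ge cst it _ _ _ b hsortn hgesn
      have hhead : ∃ e1 tail, X.1 ++ [(cst.length : Int)] = e1 :: tail ∧ b ≤ e1 := by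
        cases hx1 : X.1 with
        | nil => exact ⟨(cst.length : Int), [], by simp, le_of_lt hb2⟩
        | cons y ys =>
          exact ⟨y, ys ++ [(cst.length : Int)], by simp, hxge y (by simp [hx1])⟩
      obtain ⟨e1, tail, heq, he1⟩ := hhead
      have hunf : pvExpand (prev :: (X.1 ++ [(cst.length : Int)])) out label prev
          = pvExpand (X.1 ++ [(cst.length : Int)]) out (label + 1) prev := by
        simp [pvExpand, PySem.List.pyRepeat_singleton]
      rw [List.cons_append, hunf, heq]
      exact (pvExpand_shift e1 tail out (label + 1) prev b (le_of_lt hb1) he1).symm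
    · rw [if_neg hc, if_neg hc]
      rw [ih _ label ct b hsort' hrest]
      set X := ((rest ++ [(cst.length : Int)]).foldl
          (pvGroupStep cst it (cst.length : Int)) ([], ct, b)) with hX
      have hxge : ∀ x ∈ X.1, b ≤ x :=
        pvGroup_ge cst it _ _ _ b hsortn hgesn
      have hhead : ∃ e1 tail, X.1 ++ [(cst.length : Int)] = e1 :: tail ∧ b ≤ e1 := by
        cases hx1 : X.1 with
        | nil => exact ⟨(cst.length : Int), [], by simp, le_of_lt hb2⟩
        | cons y ys =>
          exact ⟨y, ys ++ [(cst.length : Int)], by simp, hxge y (by simp [hx1])⟩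
      obtain ⟨e1, tail, heq, he1⟩ := hhead
      rw [heq]
      exact (pvExpand_shift e1 tail out label prev b (le_of_lt hb1) he1).symm

-- B equals the intermediate form (no precondition needed)
lemma pvAlt_eq_emit (cst lss : List Int) (it : Int) :
    generate_segment_hier_alt cst lss it = pvEmit cst lss it := by
  unfold generate_segment_hier_alt pvEmit
  rw [pvExpand_foldl]
  have hfilter : ((PySem.List.pyRange 1 (cst.length : Int) 1).filter
      (fun i => !(PySem.List.pyGetD lss i 0 == PySem.List.pyGetD lss (i - 1) 0)))
      = (PySem.List.pyRange 1 (cst.length : Int) 1).filter (pvP lss) := rfl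
  rw [hfilter]
  set bs := (PySem.List.pyRange 1 (cst.length : Int) 1).filter (pvP lss) with hbs
  have hsort : bs.Pairwise (· < ·) :=
    (PySem.List.pairwise_lt_pyRange_one 1 (cst.length : Int)).filter _
  have hmem : ∀ b ∈ bs, (0 : Int) < b ∧ b < (cst.length : Int) := by
    intro b hbmem
    have := (PySem.List.mem_pyRange_one).mp (List.mem_of_mem_filter hbmem)
    omega
  exact (pvMain cst it bs [] 1 (PySem.List.pyGetD cst 0 0) 0 hsort hmem).symm

-- ===== VERDICT (by name: the statement is the Claim_ definition above) =====
theorem generate_segment_hier_spec : Claim_equal_generate_segment_hier := by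
  intro cst lss it _ hpre
  unfold Spec_generate_segment_hier
  rw [pvA_eq_emit cst lss it hpre.1, pvAlt_eq_emit]
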